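-- pv_equiv track=rewrite | github.com/khushi07-code/GNCSGI-COMPETITIVE-CODING | MaxNumberOfIntegerscanbechoose.py | maxCount
-- ===== SOURCE A (Python) =====
-- from typing import List
--
-- def maxCount(banned: List[int], n: int, maxSum: int) -> int:
--     banned_set=set(banned)
--     num_sum=0
--     count=0
--     for i in range(1,n+1):
--         if i not in banned_set and (num_sum+i)<=maxSum:
--             num_sum+=i
--             count+=1
--     return count
-- ===== SOURCE B (Python) =====
-- def block_take(a, b, budget):
--     # largest k <= b-a+1 with a + (a+1) + ... + (a+k-1) <= budget, by binary search
--     lo, hi = 0, b - a + 1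
--     while lo < hi:
--         mid = (lo + hi + 1) // 2
--         if mid * (2 * a + mid - 1) <= 2 * budget:
--             lo = mid
--         else:
--             hi = mid - 1
--     return lo
--
--
-- def maxCount(banned, n, maxSum):
--     blocks = sorted({x for x in banned if 1 <= x <= n})
--     budget = maxSum
--     count = 0
--     start = 1
--     for bval in blocks + [n + 1]:
--         a, b = start, bval - 1
--         if a <= b:
--             k = block_take(a, b, budget)
--             count += k
--             budget -= k * (2 * a + k - 1) // 2
--             if k < b - a + 1:
--                 break
--         start = bval + 1
--     return count
-- ===== Notes on version B (the rewrite author's own statement) =====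
-- stated objective: faster
-- what changed: B never scans 1..n: it sorts the distinct in-range banned values and consumes each banned-free gap in one step, binary-searching the largest count k whose triangular sum fits the remaining budget, while A tests every integer from 1 to n.
import Mathlib
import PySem

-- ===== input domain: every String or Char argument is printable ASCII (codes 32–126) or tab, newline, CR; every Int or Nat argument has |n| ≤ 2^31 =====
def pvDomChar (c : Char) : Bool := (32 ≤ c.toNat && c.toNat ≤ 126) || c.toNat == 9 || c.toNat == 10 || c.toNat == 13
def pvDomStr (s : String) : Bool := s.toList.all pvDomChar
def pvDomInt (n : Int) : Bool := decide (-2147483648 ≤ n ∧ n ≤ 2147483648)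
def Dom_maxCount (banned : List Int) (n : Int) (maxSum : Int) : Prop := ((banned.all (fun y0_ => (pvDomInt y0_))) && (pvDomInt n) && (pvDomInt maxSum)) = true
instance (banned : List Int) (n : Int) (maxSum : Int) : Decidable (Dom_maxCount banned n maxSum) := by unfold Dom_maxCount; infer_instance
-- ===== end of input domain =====

-- B replaces A's scan of every integer 1..n by arithmetic over the gaps between the sorted
-- banned values: each banned-free run is consumed in one binary search (objective: faster).

-- ===== PORT A =====
def maxCount (banned : List Int) (n : Int) (maxSum : Int) : Int :=
  let banned_set := PySem.Set.ofList banned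
  let r := (PySem.List.pyRange 1 (n + 1) 1).foldl
    (fun (s : Int × Int) i =>
      if ¬ (PySem.Set.contains banned_set i) ∧ s.1 + i ≤ maxSum then (s.1 + i, s.2 + 1) else s)
    (0, 0)
  r.2

-- ===== PORT B =====
-- midpoint bounds used by the binary search's termination proof
theorem pvMidBounds (lo hi : Int) (h : lo < hi) :
    lo < PySem.Int.floordiv (lo + hi + 1) 2 ∧ PySem.Int.floordiv (lo + hi + 1) 2 ≤ hi := by
  have h2 := PySem.Int.floordiv_two_mid_bounds (lo := lo + 1) (hi := hi) (by omega)
  have he : lo + 1 + hi = lo + hi + 1 := by ring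
  rw [he] at h2
  omega

-- the while-loop of block_take
def blockTakeGo (a budget lo hi : Int) : Int :=
  if h : lo < hi then
    let mid := PySem.Int.floordiv (lo + hi + 1) 2
    if mid * (2 * a + mid - 1) ≤ 2 * budget then blockTakeGo a budget mid hi
    else blockTakeGo a budget lo (mid - 1)
  else lo
termination_by (hi - lo).toNat
decreasing_by
  · have := pvMidBounds lo hi h; omega
  · have := pvMidBounds lo hi h; omega

def blockTake (a b budget : Int) : Int := blockTakeGo a budget 0 (b - a + 1)

-- the for-loop of maxCount (B), iterating over the sorted banned values plus the sentinel n+1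
def altOuter (lst : List Int) (n budget count start : Int) : Int :=
  match lst with
  | [] => count
  | bval :: rest =>
    let a := start
    let b := bval - 1
    if a ≤ b then
      let k := blockTake a b budget
      let count' := count + k
      let budget' := budget - PySem.Int.floordiv (k * (2 * a + k - 1)) 2
      if k < b - a + 1 then count'
      else altOuter rest n budget' count' (bval + 1)
    else altOuter rest n budget count (bval + 1)

def maxCount_alt (banned : List Int) (n : Int) (maxSum : Int) : Int :=
  let blocks := PySem.List.sorted
    (PySem.Set.ofList (banned.filter (fun x => decide (1 ≤ x) && decide (x ≤ n))))
    (fun x => x) false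
  altOuter (blocks ++ [n + 1]) n maxSum 0 1

-- ===== PRECONDITION & SPEC =====
def Spec_maxCount (banned : List Int) (n : Int) (maxSum : Int) (out : Int) : Prop := out = maxCount_alt banned n maxSum
instance (banned : List Int) (n : Int) (maxSum : Int) (out : Int) : Decidable (Spec_maxCount banned n maxSum out) := by unfold Spec_maxCount; infer_instance

-- ===== CLAIM (what is proved, stated in full; the proofs are below) =====
def Claim_equal_maxCount : Prop := ∀ (banned : List Int) (n : Int) (maxSum : Int), Dom_maxCount banned n maxSum → Spec_maxCount banned n maxSum (maxCount banned n maxSum)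

-- ===== LEMMAS AND PROOFS =====

-- proof-side reference loop: the per-integer greedy with a remaining budget
def goSimple (bs : PySem.Set Int) (n i budget count : Int) : Int :=
  if h : i ≤ n then
    if PySem.Set.contains bs i then
      goSimple bs n (i + 1) budget count
    else if budget < i then
      count
    else
      goSimple bs n (i + 1) (budget - i) (count + 1)
  else count
termination_by (n + 1 - i).toNat
decreasing_by all_goals omega

-- Once the accumulated sum plus the next index exceeds maxSum, A's loop never changes state again.
theorem foldA_stuck (bs : PySem.Set Int) (maxSum : Int) (i m : Int) (s : Int × Int)
    (h : maxSum < s.1 + i) :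
    (PySem.List.pyRange i m 1).foldl
      (fun (s : Int × Int) j =>
        if ¬ (PySem.Set.contains bs j) ∧ s.1 + j ≤ maxSum then (s.1 + j, s.2 + 1) else s) s = s := by
  by_cases him : i < m
  · rw [PySem.List.pyRange_one_cons him]
    have hcond : ¬ (¬ (PySem.Set.contains bs i) ∧ s.1 + i ≤ maxSum) := by
      rintro ⟨-, hle⟩; omega
    simp only [List.foldl_cons, if_neg hcond]
    exact foldA_stuck bs maxSum (i + 1) m s (by omega)
  · rw [PySem.List.pyRange_one_eq_nil (by omega)]; rfl
termination_by (m - i).toNat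
decreasing_by omega

-- A's fold from index i with accumulated sum maxSum - budget equals the budget loop from i.
theorem foldA_eq_go (bs : PySem.Set Int) (n maxSum : Int) (i budget count : Int) :
    ((PySem.List.pyRange i (n + 1) 1).foldl
      (fun (s : Int × Int) j =>
        if ¬ (PySem.Set.contains bs j) ∧ s.1 + j ≤ maxSum then (s.1 + j, s.2 + 1) else s)
      (maxSum - budget, count)).2 = goSimple bs n i budget count := by
  by_cases hin : i ≤ n
  · rw [PySem.List.pyRange_one_cons (by omega : i < n + 1)]
    rw [goSimple, dif_pos hin]
    by_cases hb : PySem.Set.contains bs i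
    · simp only [List.foldl_cons, hb, not_true_eq_false, false_and, if_false]
      exact foldA_eq_go bs n maxSum (i + 1) budget count
    · simp only [List.foldl_cons, if_neg hb]
      by_cases hlt : budget < i
      · have hcond : ¬ (¬ (PySem.Set.contains bs i) = true ∧ maxSum - budget + i ≤ maxSum) := by
          rintro ⟨-, hle⟩; omega
        rw [if_neg hcond, if_pos hlt, foldA_stuck bs maxSum (i + 1) (n + 1) _ (by simp; omega)]
      · have hcond : (¬ (PySem.Set.contains bs i) = true ∧ maxSum - budget + i ≤ maxSum) := by
          constructor
          · simpa using hb
          · omega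
        rw [if_pos hcond, if_neg hlt]
        have : maxSum - budget + i = maxSum - (budget - i) := by ring
        rw [this]
        exact foldA_eq_go bs n maxSum (i + 1) (budget - i) (count + 1)
  · rw [PySem.List.pyRange_one_eq_nil (by omega), goSimple, dif_neg hin]; rfl
termination_by (n + 1 - i).toNat
decreasing_by all_goals omega

-- once the budget is below the current index, the per-integer loop takes nothing more
theorem goSimple_stuck (bs : PySem.Set Int) (n i budget count : Int) (h : budget < i) :
    goSimple bs n i budget count = count := by
  rw [goSimple]
  by_cases hin : i ≤ n
  · rw [dif_pos hin]
    by_cases hb : PySem.Set.contains bs i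
    · rw [if_pos hb]; exact goSimple_stuck bs n (i + 1) budget count (by omega)
    · rw [if_neg hb, if_pos h]
  · rw [dif_neg hin]
termination_by (n + 1 - i).toNat
decreasing_by omega

-- the triangular cost k*(2a+k-1) is monotone in k (for a ≥ 1, 0 ≤ j ≤ k)
theorem cost_mono (a j k : Int) (ha : 1 ≤ a) (hj : 0 ≤ j) (hjk : j ≤ k) :
    j * (2 * a + j - 1) ≤ k * (2 * a + k - 1) := by nlinarith

-- binary-search invariant: blockTakeGo returns the largest k ≤ N with cost ≤ 2*budget
theorem blockTakeGo_spec (a budget N : Int) (ha : 1 ≤ a) (lo hi : Int)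
    (h0 : 0 ≤ lo) (hlh : lo ≤ hi) (hN : hi ≤ N)
    (hP : lo = 0 ∨ lo * (2 * a + lo - 1) ≤ 2 * budget)
    (hQ : hi = N ∨ 2 * budget < (hi + 1) * (2 * a + (hi + 1) - 1)) :
    0 ≤ blockTakeGo a budget lo hi ∧ blockTakeGo a budget lo hi ≤ N ∧
    (blockTakeGo a budget lo hi = 0 ∨
      blockTakeGo a budget lo hi * (2 * a + blockTakeGo a budget lo hi - 1) ≤ 2 * budget) ∧
    (blockTakeGo a budget lo hi = N ∨
      2 * budget < (blockTakeGo a budget lo hi + 1) * (2 * a + (blockTakeGo a budget lo hi + 1) - 1)) := by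
  rw [blockTakeGo]
  by_cases h : lo < hi
  · rw [dif_pos h]
    have hm := pvMidBounds lo hi h
    set mid := PySem.Int.floordiv (lo + hi + 1) 2 with hmid
    by_cases hc : mid * (2 * a + mid - 1) ≤ 2 * budget
    · rw [if_pos hc]
      exact blockTakeGo_spec a budget N ha mid hi (by omega) (by omega) hN (Or.inr hc) hQ
    · rw [if_neg hc]
      refine blockTakeGo_spec a budget N ha lo (mid - 1) h0 (by omega) (by omega) hP ?_
      right
      have : mid - 1 + 1 = mid := by ring
      rw [this]
      omega
  · rw [dif_neg h]
    have : lo = hi := by omega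
    subst this
    exact ⟨h0, hN, hP, hQ⟩
termination_by (hi - lo).toNat
decreasing_by
  · have := pvMidBounds lo hi h; omega
  · have := pvMidBounds lo hi h; omega

-- blockTake satisfies the per-integer recurrence of the greedy on a banned-free run
theorem blockTake_rec (a b budget : Int) (ha : 1 ≤ a) :
    blockTake a b budget =
      if a ≤ b then (if budget < a then 0 else 1 + blockTake (a + 1) b (budget - a)) else 0 := by
  by_cases hab : a ≤ b
  · rw [if_pos hab]
    have hr := blockTakeGo_spec a budget (b - a + 1) ha 0 (b - a + 1)
      le_rfl (by omega) le_rfl (Or.inl rfl) (Or.inl rfl)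
    set r := blockTakeGo a budget 0 (b - a + 1) with hrdef
    obtain ⟨hr0, hrN, hrP, hrQ⟩ := hr
    by_cases hba : budget < a
    · rw [if_pos hba]
      show r = 0
      rcases hrP with h | h
      · exact h
      · by_contra hne
        have h1 : 1 * (2 * a + 1 - 1) ≤ r * (2 * a + r - 1) :=
          cost_mono a 1 r ha (by omega) (by omega)
        nlinarith
    · rw [if_neg hba]
      have hr' := blockTakeGo_spec (a + 1) (budget - a) (b - a) (by omega) 0 (b - a)
        le_rfl (by omega) le_rfl (Or.inl rfl) (Or.inl rfl)
      show r = 1 + blockTake (a + 1) b (budget - a)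
      unfold blockTake
      have hba' : b - (a + 1) + 1 = b - a := by ring
      rw [hba']
      set r' := blockTakeGo (a + 1) (budget - a) 0 (b - a) with hrdef'
      obtain ⟨hr0', hrN', hrP', hrQ'⟩ := hr'
      -- key identity: (k+1)*(2a + (k+1) - 1) = 2a + k*(2(a+1) + k - 1)
      have hkey : ∀ k : Int, (k + 1) * (2 * a + (k + 1) - 1) = 2 * a + k * (2 * (a + 1) + k - 1) := by
        intro k; ring
      -- r ≥ r' + 1
      have hge : r' + 1 ≤ r := by
        by_contra hlt
        push_neg at hlt
        have hcost : (r' + 1) * (2 * a + (r' + 1) - 1) ≤ 2 * budget := by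
          rw [hkey]
          rcases hrP' with h | h
          · rw [h]; simp; omega
          · omega
        rcases hrQ with h | h
        · omega
        · have : (r + 1) * (2 * a + (r + 1) - 1) ≤ (r' + 1) * (2 * a + (r' + 1) - 1) :=
            cost_mono a (r + 1) (r' + 1) ha (by omega) (by omega)
          omega
      -- r ≤ r' + 1
      have hle : r ≤ r' + 1 := by
        by_contra hgt
        push_neg at hgt
        have hrpos : r * (2 * a + r - 1) ≤ 2 * budget := by
          rcases hrP with h | h
          · omega
          · exact h
        have hcost' : (r - 1) * (2 * (a + 1) + (r - 1) - 1) ≤ 2 * (budget - a) := by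
          have := hkey (r - 1)
          have hrw : r - 1 + 1 = r := by ring
          rw [hrw] at this
          omega
        rcases hrQ' with h | h
        · omega
        · have : (r' + 1) * (2 * (a + 1) + (r' + 1) - 1) ≤ (r - 1) * (2 * (a + 1) + (r - 1) - 1) :=
            cost_mono (a + 1) (r' + 1) (r - 1) (by omega) (by omega) (by omega)
          omega
      omega
  · rw [if_neg hab]
    unfold blockTake
    rw [blockTakeGo, dif_neg (by omega)]

-- cost is even, so the floor halving in B is exact arithmetic
theorem cost_even (a k : Int) : 2 ∣ k * (2 * a + k - 1) := by
  rcases Int.even_or_odd k with ⟨m, hm⟩ | ⟨m, hm⟩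
  · exact ⟨m * (2 * a + k - 1), by rw [hm]; ring⟩
  · exact ⟨k * (a + m), by rw [hm]; ring⟩

-- consuming one banned-free run [a,b]: the per-integer loop equals one blockTake step
theorem run_eq (bs : PySem.Set Int) (n budget count a b : Int)
    (ha : 1 ≤ a) (hab : a ≤ b) (hbn : b ≤ n)
    (hNB : ∀ j, a ≤ j → j ≤ b → ¬ PySem.Set.contains bs j) :
    goSimple bs n a budget count =
      (if blockTake a b budget < b - a + 1 then count + blockTake a b budget
       else goSimple bs n (b + 1)
         (budget - PySem.Int.floordiv (blockTake a b budget * (2 * a + blockTake a b budget - 1)) 2)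
         (count + blockTake a b budget)) := by
  have hstep := blockTake_rec a b budget ha
  rw [if_pos hab] at hstep
  rw [goSimple, dif_pos (by omega : a ≤ n),
    if_neg (by simpa using hNB a le_rfl hab)]
  by_cases hba : budget < a
  · rw [if_pos hba]
    have hk0 : blockTake a b budget = 0 := by rw [hstep, if_pos hba]
    rw [hk0, if_pos (by omega : (0:Int) < b - a + 1)]
    omega
  · rw [if_neg hba] at hstep ⊢
    set k' := blockTake (a + 1) b (budget - a) with hk'
    have hfd : PySem.Int.floordiv ((1 + k') * (2 * a + (1 + k') - 1)) 2
        = a + PySem.Int.floordiv (k' * (2 * (a + 1) + k' - 1)) 2 := by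
      rw [PySem.Int.floordiv_eq_ediv_of_pos (by omega), PySem.Int.floordiv_eq_ediv_of_pos (by omega)]
      have h1 := cost_even a (1 + k')
      have h2 := cost_even (a + 1) k'
      have hkey : (1 + k') * (2 * a + (1 + k') - 1) = 2 * a + k' * (2 * (a + 1) + k' - 1) := by ring
      omega
    by_cases hlast : a = b
    · -- single-element run: k' = 0 on the empty tail
      have hk'0 : k' = 0 := by
        rw [hk', blockTake_rec (a + 1) b (budget - a) (by omega), if_neg (by omega)]
      rw [hstep, hk'0, if_neg (by omega)]
      have hfd1 : PySem.Int.floordiv ((1 + (0:Int)) * (2 * a + (1 + 0) - 1)) 2 = a := by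
        have he : (1 + (0:Int)) * (2 * a + (1 + 0) - 1) = 2 * a := by ring
        rw [he, PySem.Int.floordiv_eq_ediv_of_pos (by omega : (0:Int) < 2)]
        omega
      rw [hfd1]
      have hb1 : b + 1 = a + 1 := by omega
      have hc1 : count + (1 + (0:Int)) = count + 1 := by omega
      rw [hb1, hc1]
    · -- longer run: recurse on [a+1, b]
      have hIH := run_eq bs n (budget - a) (count + 1) (a + 1) b (by omega) (by omega) hbn
        (fun j h1 h2 => hNB j (by omega) h2)
      rw [hIH, hstep]
      by_cases hbreak : k' < b - (a + 1) + 1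
      · rw [if_pos hbreak, if_pos (by omega)]
        omega
      · rw [if_neg hbreak, if_neg (by omega), hfd]
        have hbud : budget - a - PySem.Int.floordiv (k' * (2 * (a + 1) + k' - 1)) 2
            = budget - (a + PySem.Int.floordiv (k' * (2 * (a + 1) + k' - 1)) 2) := by ring
        rw [hbud]
        have hcnt : count + 1 + k' = count + (1 + k') := by ring
        rw [hcnt]
termination_by (b - a).toNat
decreasing_by omega

-- the outer loop over the sorted banned values equals the per-integer loop
theorem outer_eq (bs : PySem.Set Int) (n : Int) (L : List Int) (budget count start : Int)
    (hs : 1 ≤ start)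
    (hsort : L.Pairwise (· < ·))
    (hlb : ∀ x ∈ L, start ≤ x) (hub : ∀ x ∈ L, x ≤ n)
    (hmem : ∀ j, start ≤ j → j ≤ n → (PySem.Set.contains bs j = true ↔ j ∈ L)) :
    altOuter (L ++ [n + 1]) n budget count start = goSimple bs n start budget count := by
  match L with
  | [] =>
    simp only [List.nil_append, altOuter]
    by_cases hsn : start ≤ n + 1 - 1
    · rw [if_pos hsn]
      have hrun := run_eq bs n budget count start (n + 1 - 1) hs hsn (by omega)
        (fun j h1 h2 => by
          intro hc
          exact absurd ((hmem j h1 (by omega)).1 hc) (List.not_mem_nil))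
      rw [hrun]
      by_cases hbr : blockTake start (n + 1 - 1) budget < n + 1 - 1 - start + 1
      · rw [if_pos hbr, if_pos hbr]
      · rw [if_neg hbr, if_neg hbr]
        have he : n + 1 - 1 + 1 = n + 1 := by ring
        rw [he, goSimple, dif_neg (by omega)]
    · rw [if_neg hsn]
      rw [goSimple, dif_neg (by omega)]
  | v :: rest =>
    have hvn : v ≤ n := hub v List.mem_cons_self
    have hsv : start ≤ v := hlb v List.mem_cons_self
    have hv1 : 1 ≤ v := by omega
    have hrest_gt : ∀ x ∈ rest, v < x := fun x hx => (List.pairwise_cons.1 hsort).1 x hx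
    have hIH : ∀ budget' count', altOuter (rest ++ [n + 1]) n budget' count' (v + 1)
        = goSimple bs n (v + 1) budget' count' := by
      intro budget' count'
      exact outer_eq bs n rest budget' count' (v + 1) (by omega)
        (List.pairwise_cons.1 hsort).2
        (fun x hx => by have := hrest_gt x hx; omega)
        (fun x hx => hub x (List.mem_cons_of_mem _ hx))
        (fun j h1 h2 => by
          rw [hmem j (by omega) h2]
          constructor
          · intro h
            rcases List.mem_cons.1 h with h | h
            · omega
            · exact h
          · intro h
            exact List.mem_cons_of_mem _ h)
    have hcv : PySem.Set.contains bs v = true :=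
      (hmem v hsv hvn).2 List.mem_cons_self
    have hstepv : ∀ budget' count', goSimple bs n v budget' count'
        = goSimple bs n (v + 1) budget' count' := by
      intro budget' count'
      rw [goSimple, dif_pos (by omega : v ≤ n), if_pos hcv]
    simp only [List.cons_append, altOuter]
    by_cases hblk : start ≤ v - 1
    · rw [if_pos hblk]
      have hrun := run_eq bs n budget count start (v - 1) hs hblk (by omega)
        (fun j h1 h2 => by
          intro hc
          have hj := (hmem j h1 (by omega)).1 hc
          rcases List.mem_cons.1 hj with h | h
          · omega
          · have := hrest_gt j h; omega)
      rw [hrun]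
      by_cases hbr : blockTake start (v - 1) budget < v - 1 - start + 1
      · rw [if_pos hbr, if_pos hbr]
      · rw [if_neg hbr, if_neg hbr]
        have : v - 1 + 1 = v := by ring
        rw [this, hstepv]
        exact hIH _ _
    · rw [if_neg hblk]
      have hsveq : start = v := by omega
      rw [hIH, hsveq, hstepv]
termination_by L.length

-- ===== VERDICT (by name: the statement is the Claim_ definition above) =====
theorem maxCount_spec : Claim_equal_maxCount := by
  intro banned n maxSum _
  unfold Spec_maxCount maxCount maxCount_alt
  have hA := foldA_eq_go (PySem.Set.ofList banned) n maxSum 1 maxSum 0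
  simp only [sub_self] at hA
  rw [hA]
  have hblocks : ∀ x : Int,
      x ∈ PySem.List.sorted
        (PySem.Set.ofList (banned.filter (fun x => decide (1 ≤ x) && decide (x ≤ n))))
        (fun x => x) false ↔ (x ∈ banned ∧ 1 ≤ x ∧ x ≤ n) := by
    intro x
    rw [PySem.List.mem_sorted, PySem.Set.mem_ofList, List.mem_filter]
    simp
  have hsort := PySem.List.sorted_ofList_pairwise_lt
    (xs := banned.filter (fun x => decide (1 ≤ x) && decide (x ≤ n)))
  exact (outer_eq (PySem.Set.ofList banned) n _ maxSum 0 1 le_rfl hsort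
    (fun x hx => ((hblocks x).1 hx).2.1)
    (fun x hx => ((hblocks x).1 hx).2.2)
    (fun j h1 h2 => by
      rw [PySem.Set.contains_iff, PySem.Set.mem_ofList, hblocks j]
      constructor
      · intro h; exact ⟨h, h1, h2⟩
      · intro h; exact h.1)).symm
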